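-- pv_equiv track=rewrite | github.com/wangzhefeng/orproj | utils/Gurobi 代码/第4章-计算复杂性理论/Chapter4_穷举法求解TSP.py | cal_route_dis
-- ===== SOURCE A (Python) =====
-- import itertools
--
-- def cal_route_dis(city_num, dis_matrix):
--     route_length = city_num - 1
--     route_dis_dict = {}
--     min_paths = []
--     min_dis = float('Inf')
--     all_min_dis = [float('Inf') for i in range(len(dis_matrix))]
--
--     paths = itertools.permutations(range(city_num))
--     for path in paths:
--         key = path
--         route_dis = sum([dis_matrix[path[i]][path[i + 1]] for i in range(route_length)] + [dis_matrix[path[-1]][path[0]]])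
--         route_dis_dict[key] = route_dis
--
--         if route_dis < min_dis:
--             min_dis = route_dis
--             min_paths = []
--             min_paths.append(path)
--         elif min_dis == route_dis:
--             min_paths.append(path)
--
--     return min_paths, route_dis_dict
-- ===== SOURCE B (Python) =====
-- def cal_route_dis(city_num, dis_matrix):
--     # Recursive backtracking: extend the tour city by city, accumulating the
--     # partial route cost incrementally; close the cycle at each leaf, then
--     # scan the finished table once for the optimum.
--     route_dis_dict = {}
--
--     def dfs(path, remaining, cost):
--         if not remaining:
--             route_dis_dict[path] = cost + dis_matrix[path[-1]][path[0]]
--             return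
--         for c in remaining:
--             step = dis_matrix[path[-1]][c] if path else 0
--             dfs(path + (c,), tuple(x for x in remaining if x != c), cost + step)
--
--     dfs((), tuple(range(city_num)), 0)
--     min_dis = min(route_dis_dict.values())
--     min_paths = [p for p, d in route_dis_dict.items() if d == min_dis]
--     return min_paths, route_dis_dict
-- ===== Notes on version B (the rewrite author's own statement) =====
-- stated objective: alternative
-- what changed: B replaces itertools.permutations plus a per-permutation index-arithmetic sum and interleaved running-minimum bookkeeping by a recursive backtracking search that builds each tour city by city while accumulating the partial route cost incrementally along the recursion, records the closed-cycle cost at each leaf, and only afterwards scans the finished table once for the minimum and the argmin paths.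
import Mathlib
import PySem

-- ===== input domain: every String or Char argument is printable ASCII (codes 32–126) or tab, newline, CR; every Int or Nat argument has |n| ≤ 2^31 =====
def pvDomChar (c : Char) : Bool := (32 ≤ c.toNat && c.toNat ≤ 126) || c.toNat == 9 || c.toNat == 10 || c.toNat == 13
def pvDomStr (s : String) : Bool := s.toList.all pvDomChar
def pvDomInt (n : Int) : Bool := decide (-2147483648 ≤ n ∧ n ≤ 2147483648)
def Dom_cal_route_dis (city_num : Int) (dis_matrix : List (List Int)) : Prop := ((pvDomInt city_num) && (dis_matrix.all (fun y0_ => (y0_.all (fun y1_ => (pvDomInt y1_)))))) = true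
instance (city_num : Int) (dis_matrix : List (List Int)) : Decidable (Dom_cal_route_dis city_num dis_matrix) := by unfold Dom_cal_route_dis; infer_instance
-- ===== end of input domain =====

-- B replaces itertools.permutations + per-permutation index-arithmetic sums + interleaved
-- running-minimum bookkeeping by a recursive backtracking search accumulating the partial
-- route cost incrementally, then one scan of the finished table for the optimum (alternative).


-- ===== PORT A =====
-- dis_matrix[a][b] (both programs index the matrix the same way; defaults are unreachable inside Pre_)
def pvEdge (dis_matrix : List (List Int)) (a b : Int) : Int :=
  PySem.List.pyGetD (PySem.List.pyGetD dis_matrix a []) b 0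

-- dis_matrix[path[-1]][path[0]] (the cycle-closing edge; both programs compute it)
def pvClose (dis_matrix : List (List Int)) (path : List Int) : Int :=
  pvEdge dis_matrix (PySem.List.pyGetD path (-1) 0) (PySem.List.pyGetD path 0 0)

-- A's route distance: sum([dis_matrix[path[i]][path[i+1]] for i in range(route_length)] + [dis_matrix[path[-1]][path[0]]])
def pvRouteDisA (route_length : Int) (dis_matrix : List (List Int)) (path : List Int) : Int :=
  ((PySem.List.pyRange 0 route_length 1).map (fun i =>
      pvEdge dis_matrix (PySem.List.pyGetD path i 0) (PySem.List.pyGetD path (i + 1) 0))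
    ++ [pvClose dis_matrix path]).sum

def cal_route_dis (city_num : Int) (dis_matrix : List (List Int)) : List (List Int) × (List (List Int × Int)) :=
  let route_length := city_num - 1
  let rng := PySem.List.pyRange 0 city_num 1
  let paths := PySem.List.permutations rng rng.length
  let st := paths.foldl
    (fun (st : PySem.Dict (List Int) Int × (List (List Int) × Option Int)) path =>
      let route_dis := pvRouteDisA route_length dis_matrix path
      (st.1.insert path route_dis,
        match st.2.2 with
        | none => ([path], some route_dis)                    -- min_dis still float('Inf')
        | some min_dis =>
          if route_dis < min_dis then ([path], some route_dis)
          else if min_dis = route_dis then (st.2.1 ++ [path], some min_dis)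
          else (st.2.1, some min_dis)))
    (PySem.Dict.empty, ([], none))
  (st.2.1, st.1.items)

-- ===== PORT B =====
-- the incremental cost of appending city c to a partial tour: dis_matrix[path[-1]][c] if path else 0
def pvStep (dis_matrix : List (List Int)) (path : List Int) (c : Int) : Int :=
  if path = [] then 0 else pvEdge dis_matrix (PySem.List.pyGetD path (-1) 0) c

-- B's dfs: extend the tour by each remaining city in order, accumulating cost; at a leaf
-- close the cycle and record the tour in the dict
def pvDfs (dis_matrix : List (List Int)) (d : PySem.Dict (List Int) Int)
    (path remaining : List Int) (cost : Int) : PySem.Dict (List Int) Int :=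
  match remaining with
  | [] => d.insert path (cost + pvClose dis_matrix path)
  | x :: xs =>
    (x :: xs).attach.foldl
      (fun d c => pvDfs dis_matrix d (path ++ [c.1])
        ((x :: xs).filter (fun y => y ≠ c.1)) (cost + pvStep dis_matrix path c.1)) d
termination_by remaining.length
decreasing_by
  rw [List.length_filter_lt_length_iff_exists]
  exact ⟨c.1, c.2, by simp⟩

def cal_route_dis_alt (city_num : Int) (dis_matrix : List (List Int)) : List (List Int) × (List (List Int × Int)) :=
  let rng := PySem.List.pyRange 0 city_num 1
  let route_dis_dict := pvDfs dis_matrix PySem.Dict.empty [] rng 0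
  let min_dis := (PySem.List.min? route_dis_dict.values (fun v => v)).getD 0  -- values are never empty
  let min_paths := (route_dis_dict.items.filter (fun pd => pd.2 == min_dis)).map (fun pd => pd.1)
  (min_paths, route_dis_dict.items)

-- ===== PRECONDITION & SPEC =====
-- Exactly the inputs where A returns: at least one city, one row per city, and row i long enough
-- for every column j an edge (i, j) of some cyclic tour actually reads (j ≠ i, except the
-- self-loop (0, 0) when city_num = 1); outside this A raises IndexError.
def Pre_cal_route_dis (city_num : Int) (dis_matrix : List (List Int)) : Prop :=
  0 < city_num ∧ city_num ≤ (dis_matrix.length : Int) ∧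
  ∀ i : Nat, i < city_num.toNat → ∀ j : Nat, j < city_num.toNat → (city_num = 1 ∨ i ≠ j) →
    j < (dis_matrix.getD i []).length
instance (city_num : Int) (dis_matrix : List (List Int)) : Decidable (Pre_cal_route_dis city_num dis_matrix) := by unfold Pre_cal_route_dis; infer_instance
def pvWitness_cal_route_dis : Int × List (List Int) := (2, [[0, 7], [3, 0]])

-- A raises IndexError (path[-1] on the empty tour) whenever city_num ≤ 0, and so does B;
-- Raises_ block omitted: B raises there too.

def Spec_cal_route_dis (city_num : Int) (dis_matrix : List (List Int)) (out : List (List Int) × (List (List Int × Int))) : Prop := out = cal_route_dis_alt city_num dis_matrix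
instance (city_num : Int) (dis_matrix : List (List Int)) (out : List (List Int) × (List (List Int × Int))) : Decidable (Spec_cal_route_dis city_num dis_matrix out) := by unfold Spec_cal_route_dis; infer_instance

-- ===== CLAIM (what is proved, stated in full; the proofs are below) =====
def Claim_equal_cal_route_dis : Prop := ∀ (city_num : Int) (dis_matrix : List (List Int)), Dom_cal_route_dis city_num dis_matrix → Pre_cal_route_dis city_num dis_matrix → Spec_cal_route_dis city_num dis_matrix (cal_route_dis city_num dis_matrix)

-- ===== LEMMAS AND PROOFS =====

-- the total edge cost along the chain of a list (consecutive pairs, no closing edge)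
def pvEdges (dis_matrix : List (List Int)) (l : List Int) : Int :=
  ((l.zip l.tail).map (fun ab => pvEdge dis_matrix ab.1 ab.2)).sum

-- the cost B's dfs accumulates while appending the cities of s after path
def pvExt (dis_matrix : List (List Int)) : List Int → List Int → Int
  | _, [] => 0
  | path, c :: s => pvStep dis_matrix path c + pvExt dis_matrix (path ++ [c]) s

theorem pvPermsNodup {α : Type} [DecidableEq α] :
    ∀ (r : Nat) (xs : List α), xs.Nodup → (PySem.List.permutations xs r).Nodup := by
  intro r
  induction r with
  | zero => intro xs _; rw [PySem.List.permutations_zero]; simp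
  | succ r ih =>
    intro xs hnd
    rw [PySem.List.permutations_succ, List.nodup_flatMap]
    constructor
    · intro i hi
      rw [List.mem_range] at hi
      simp only [List.getElem?_eq_getElem hi]
      exact ((ih _ (hnd.sublist (List.eraseIdx_sublist xs i))).map
        (fun p q h => by simpa using h))
    · rw [List.pairwise_iff_getElem]
      intro a b ha hb hab
      rw [List.length_range] at ha hb
      simp only [Function.onFun, List.Disjoint, List.getElem_range]
      simp only [List.getElem?_eq_getElem ha, List.getElem?_eq_getElem hb]
      intro q hqa hqb
      simp only [List.mem_map] at hqa hqb
      obtain ⟨p, _, rfl⟩ := hqa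
      obtain ⟨p', _, h2⟩ := hqb
      have : xs[b] = xs[a] := (List.cons.injEq _ _ _ _ ▸ h2).1
      exact absurd (List.Nodup.getElem_inj_iff hnd |>.mp this.symm) (by omega)

theorem pvPermsNeNil : ∀ (r : Nat) (xs : List Int), r = xs.length →
    PySem.List.permutations xs r ≠ [] := by
  intro r
  induction r with
  | zero => intro xs _; rw [PySem.List.permutations_zero]; simp
  | succ r ih =>
    intro xs hr
    match xs with
    | y :: ys =>
      rw [PySem.List.permutations_succ]
      intro hcontra
      have h0 : (0 : Nat) ∈ List.range (y :: ys).length := by simp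
      have := List.flatMap_eq_nil_iff.mp hcontra _ h0
      simp only [List.getElem?_cons_zero, List.eraseIdx_cons_zero] at this
      rw [List.map_eq_nil_iff] at this
      exact ih ys (by simpa using hr) this

-- rem = [rem.getD 0 0, rem.getD 1 0, …]
theorem pvMapRange (rem : List Int) :
    (List.range rem.length).map (fun i => rem.getD i 0) = rem := by
  apply List.ext_getElem
  · simp
  · intro i h1 h2
    simp [List.getD_eq_getElem?_getD, List.getElem?_eq_getElem h2]

theorem pvFilterNe (l : List Int) (a : Int) (h : l.Nodup) :
    l.filter (fun x => x ≠ a) = l.erase a := by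
  rw [h.erase_eq_filter]
  apply List.filter_congr; intro x _
  simp [bne, ne_eq, decide_not]
  rw [Bool.eq_iff_iff]; simp

-- B's dfs over a duplicate-free remaining list inserts one entry per permutation, in
-- permutation order, with the incremental cost
theorem pvDfs_eq (dm : List (List Int)) :
    ∀ (n : Nat) (rem : List Int), rem.length = n → rem.Nodup →
    ∀ (d : PySem.Dict (List Int) Int) (path : List Int) (cost : Int),
      pvDfs dm d path rem cost =
        (PySem.List.permutations rem n).foldl
          (fun d s => d.insert (path ++ s) (cost + pvExt dm path s + pvClose dm (path ++ s))) d := by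
  intro n
  induction n with
  | zero =>
    intro rem hl _ d path cost
    match rem, hl with
    | [], _ =>
      rw [PySem.List.permutations_zero]
      rw [pvDfs]
      simp [pvExt]
  | succ n ih =>
    intro rem hl hnd d path cost
    match rem, hl with
    | x :: xs, hl =>
      rw [pvDfs, List.foldl_attach (f := fun d c => pvDfs dm d (path ++ [c])
        (List.filter (fun y => decide (y ≠ c)) (x :: xs)) (cost + pvStep dm path c))]
      rw [PySem.List.permutations_succ, List.foldl_flatMap]
      rw [PySem.List.foldl_congr_mem (List.range (x :: xs).length) _
        (fun d i => pvDfs dm d (path ++ [(x :: xs).getD i 0])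
          ((x :: xs).filter (fun y => y ≠ (x :: xs).getD i 0))
          (cost + pvStep dm path ((x :: xs).getD i 0))) d ?_]
      · conv_rhs => rw [← List.foldl_map (f := fun i => (x :: xs).getD i 0)
            (g := fun d c => pvDfs dm d (path ++ [c])
              (List.filter (fun y => decide (y ≠ c)) (x :: xs)) (cost + pvStep dm path c)),
          pvMapRange (x :: xs)]
      · intro acc i hi
        rw [List.mem_range] at hi
        simp only [List.getD_eq_getElem?_getD, List.getElem?_eq_getElem hi, Option.getD_some]
        rw [List.foldl_map]
        have hfe : (x :: xs).filter (fun y => y ≠ (x :: xs)[i]) = (x :: xs).eraseIdx i := by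
          rw [pvFilterNe _ _ hnd, List.Nodup.erase_getElem hnd i hi]
        rw [hfe]
        rw [ih ((x :: xs).eraseIdx i) (by rw [List.length_eraseIdx_of_lt hi]; omega)
          (hnd.sublist (List.eraseIdx_sublist _ i)) acc (path ++ [(x :: xs)[i]])
          (cost + pvStep dm path (x :: xs)[i])]
        apply PySem.List.foldl_congr_mem
        intro d2 s _
        have hk : path ++ (x :: xs)[i] :: s = (path ++ [(x :: xs)[i]]) ++ s := by
          rw [List.append_cons]
        rw [hk]
        have hv : pvExt dm path ((x :: xs)[i] :: s)
            = pvStep dm path (x :: xs)[i] + pvExt dm (path ++ [(x :: xs)[i]]) s := rfl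
        congr 1
        rw [hv]
        ring

theorem pvExt_append (dm : List (List Int)) :
    ∀ (s pre : List Int) (a : Int), pvExt dm (pre ++ [a]) s = pvEdges dm (a :: s) := by
  intro s
  induction s with
  | nil => intro pre a; simp [pvExt, pvEdges]
  | cons c s ih =>
    intro pre a
    show pvStep dm (pre ++ [a]) c + pvExt dm ((pre ++ [a]) ++ [c]) s = _
    rw [ih (pre ++ [a]) c]
    unfold pvStep
    rw [if_neg (by simp), PySem.List.pyGetD_neg_one_append_singleton]
    simp [pvEdges]

theorem pvExt_nil (dm : List (List Int)) (a : Int) (t : List Int) :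
    pvExt dm [] (a :: t) = pvEdges dm (a :: t) := by
  show pvStep dm [] a + pvExt dm ([] ++ [a]) t = _
  rw [pvExt_append dm t [] a]
  simp [pvStep]

theorem pvZipTail : ∀ (t : List Int) (a : Int),
    (a :: t).zip t =
      (List.range t.length).map (fun k => ((a :: t).getD k 0, (a :: t).getD (k + 1) 0)) := by
  intro t
  induction t with
  | nil => intro a; simp
  | cons b t ih =>
    intro a
    simp only [List.zip_cons_cons, List.length_cons, List.range_succ_eq_map, List.map_cons,
      List.map_map, Function.comp_def]
    rw [ih b]
    simp

-- B's per-tour cost is A's route distance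
theorem pvRouteEq (dm : List (List Int)) (p : List Int) (hne : p ≠ []) :
    pvRouteDisA ((p.length : Int) - 1) dm p = pvExt dm [] p + pvClose dm p := by
  match p with
  | a :: t =>
    rw [pvExt_nil dm a t]
    unfold pvRouteDisA pvEdges
    have h1 : ((a :: t).length : Int) - 1 = (t.length : Nat) := by simp
    rw [h1, PySem.List.pyRange_zero_natCast]
    rw [List.tail_cons, pvZipTail t a]
    simp only [List.map_map, List.sum_append, List.sum_cons, List.sum_nil, Function.comp_def]
    congr 1
    congr 1
    apply List.map_congr_left
    intro k hk
    rw [show ((k : Int) + 1) = ((k + 1 : Nat) : Int) by push_cast; ring,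
      PySem.List.pyGetD_natCast, PySem.List.pyGetD_natCast]
    simp

theorem pvRunMin (g : List Int → Int) :
    ∀ (t : List (List Int)) (mp : List (List Int)) (m : Int),
      t.foldl (fun (s : List (List Int) × Option Int) path =>
          match s.2 with
          | none => ([path], some (g path))
          | some min_dis =>
            if g path < min_dis then ([path], some (g path))
            else if min_dis = g path then (s.1 ++ [path], some min_dis)
            else (s.1, some min_dis)) (mp, some m)
        = ((if (t.map g).foldl min m < m then [] else mp)
            ++ t.filter (fun p => g p == (t.map g).foldl min m),
           some ((t.map g).foldl min m)) := by
  intro t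
  induction t with
  | nil => intro mp m; simp
  | cons p t ih =>
    intro mp m
    simp only [List.foldl_cons, List.map_cons, List.filter_cons]
    by_cases h1 : g p < m
    · rw [if_pos h1, ih [p] (g p)]
      have hm : min m (g p) = g p := by omega
      simp only [hm]
      have hle := (PySem.List.foldl_min_le (t.map g) (g p)).1
      rw [if_pos (show (t.map g).foldl min (g p) < m by omega)]
      by_cases h2 : (t.map g).foldl min (g p) < g p
      · rw [if_pos h2]
        have : (g p == (t.map g).foldl min (g p)) = false := by simp; omega
        rw [this]
        simp
      · rw [if_neg h2]
        have : (g p == (t.map g).foldl min (g p)) = true := by simp; omega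
        rw [this]
        simp
    · rw [if_neg h1]
      have hm : min m (g p) = m := by omega
      by_cases h2 : m = g p
      · rw [if_pos h2, ih (mp ++ [p]) m]
        simp only [hm]
        have hle := (PySem.List.foldl_min_le (t.map g) m).1
        by_cases h3 : (t.map g).foldl min m < m
        · rw [if_pos h3, if_pos h3]
          have : (g p == (t.map g).foldl min m) = false := by simp; omega
          rw [this]
          simp
        · rw [if_neg h3, if_neg h3]
          have : (g p == (t.map g).foldl min m) = true := by simp; omega
          rw [this]
          simp
      · rw [if_neg h2, ih mp m]
        simp only [hm]
        have hle := (PySem.List.foldl_min_le (t.map g) m).1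
        have : (g p == (t.map g).foldl min m) = false := by simp; omega
        rw [this]
        simp

theorem pvMain (city_num : Int) (dis_matrix : List (List Int))
    (hn : 0 < city_num) :
    cal_route_dis city_num dis_matrix = cal_route_dis_alt city_num dis_matrix := by
  unfold cal_route_dis cal_route_dis_alt
  dsimp only
  set g : List Int → Int := fun p => pvRouteDisA (city_num - 1) dis_matrix p with hg
  have hgp : ∀ p : List Int, pvRouteDisA (city_num - 1) dis_matrix p = g p := fun p => by rw [hg]
  set rng := PySem.List.pyRange 0 city_num 1 with hrng
  set L := PySem.List.permutations rng rng.length with hL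
  have hLnd : L.Nodup := pvPermsNodup rng.length rng (PySem.List.nodup_pyRange_one 0 city_num)
  have hLne : L ≠ [] := pvPermsNeNil rng.length rng rfl
  have hplen : ∀ p ∈ L, p.length = city_num.toNat := by
    intro p hp
    have := PySem.List.length_of_mem_permutations hp
    rw [this, hrng]
    simp [PySem.List.length_pyRange_one]
  -- A side: name the per-path distance g
  rw [PySem.List.foldl_congr_mem L _
    (fun (st : PySem.Dict (List Int) Int × (List (List Int) × Option Int)) path =>
      (st.1.insert path (g path),
        match st.2.2 with
        | none => ([path], some (g path))
        | some min_dis =>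
          if g path < min_dis then ([path], some (g path))
          else if min_dis = g path then (st.2.1 ++ [path], some min_dis)
          else (st.2.1, some min_dis)))
    _ (by intro acc x hx; rw [hgp x])]
  -- split the product fold
  rw [PySem.List.foldl_prod_mk
    (f := fun (d : PySem.Dict (List Int) Int) path => d.insert path (g path))
    (g := fun (s : List (List Int) × Option Int) path =>
      match s.2 with
      | none => ([path], some (g path))
      | some min_dis =>
        if g path < min_dis then ([path], some (g path))
        else if min_dis = g path then (s.1 ++ [path], some min_dis)
        else (s.1, some min_dis))]
  -- B side: the dfs builds the same dict
  rw [pvDfs_eq dis_matrix rng.length rng rfl (PySem.List.nodup_pyRange_one 0 city_num)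
    PySem.Dict.empty [] 0]
  rw [PySem.List.foldl_congr_mem L
    (fun (d : PySem.Dict (List Int) Int) s =>
      d.insert ([] ++ s) (0 + pvExt dis_matrix [] s + pvClose dis_matrix ([] ++ s)))
    (fun (d : PySem.Dict (List Int) Int) s => d.insert s (g s)) PySem.Dict.empty
    (by
      intro acc s hs
      have hlen := hplen s hs
      have hne : s ≠ [] := by intro h; rw [h] at hlen; simp at hlen; omega
      have heq := pvRouteEq dis_matrix s hne
      have h1 : ((s.length : Int)) - 1 = city_num - 1 := by rw [hlen]; omega
      rw [h1] at heq
      simp only [List.nil_append, zero_add]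
      rw [← heq, hgp s])]
  have hitems : (L.foldl (fun d path => d.insert path (g path))
      (PySem.Dict.empty : PySem.Dict (List Int) Int)).items = L.map (fun p => (p, g p)) := by
    have := PySem.Dict.items_foldl_insert_fresh L (fun p => p) g
      (PySem.Dict.empty : PySem.Dict (List Int) Int)
      (by intro a _; simp [pysem]) (by simpa using hLnd)
    simpa using this
  obtain ⟨x, t, hxt⟩ := List.exists_cons_of_ne_nil hLne
  simp only [PySem.Dict.values]
  rw [hitems, hxt]
  simp only [List.foldl_cons]
  rw [pvRunMin g t [x] (g x)]
  have hvals : ((x :: t).map (fun p => (p, g p))).map (fun pd : List Int × Int => pd.2)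
      = g x :: t.map g := by simp
  simp only [hvals]
  rw [PySem.List.min?_id_cons]
  simp only [Option.getD_some]
  have hle := (PySem.List.foldl_min_le (t.map g) (g x)).1
  refine Prod.ext ?_ rfl
  show _ = (((x :: t).map (fun p => (p, g p))).filter
      (fun pd => pd.2 == (t.map g).foldl min (g x))).map (fun pd => pd.1)
  rw [List.filter_map, List.map_map]
  have hcomp : ((fun pd : List Int × Int => pd.2 == (t.map g).foldl min (g x)) ∘ fun p => (p, g p))
      = fun p => g p == (t.map g).foldl min (g x) := rfl
  rw [hcomp]
  have hid : ((fun pd : List Int × Int => pd.1) ∘ fun p => (p, g p)) = id := rfl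
  rw [hid, List.map_id, List.filter_cons]
  by_cases h : (t.map g).foldl min (g x) < g x
  · rw [if_pos h]
    have : (g x == (t.map g).foldl min (g x)) = false := by simp; omega
    rw [this]
    simp
  · rw [if_neg h]
    have : (g x == (t.map g).foldl min (g x)) = true := by simp; omega
    rw [this]
    simp

-- ===== VERDICT (by name: the statement is the Claim_ definition above) =====
theorem cal_route_dis_spec : Claim_equal_cal_route_dis := by
  intro city_num dis_matrix _ hPre
  unfold Pre_cal_route_dis at hPre
  unfold Spec_cal_route_dis
  exact pvMain city_num dis_matrix hPre.1
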